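-- pv_equiv track=rewrite | github.com/una1veritas/Puzzle | eguchi.t_sudoku/B.Thesis/OneDrive-2022-02-27/sudoku_tech.py | tech1_group
-- ===== SOURCE A (Python) =====
-- def tech1_group(value, x, y, i):
--     zero_count = 0
--     xbase = (x // 3) * 3
--     ybase = (y // 3) * 3
--
--     #各グループの空きマスの数をカウントする
--     for _y in range(ybase, ybase + 3):
--         for _x in range (xbase, xbase + 3):
--             if value[_y][_x] == 0:
--                 zero_count = zero_count + 1
--
--     #空きマスが1つだけなら制約を満たすよう数字を入れる
--     if zero_count == 1:
--         for _y in range(ybase, ybase + 3):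
--             for _x in range (xbase, xbase + 3):
--                 if check(value, _x, _y, i):
--                     if value[_y][_x] == 0:
--                         value[_y][_x] = i
--                         return True
--     return False
--
-- def check(value, x, y, i):
--     if row(value, y, i) and column(value, x, i) and block(value, x, y, i):
--         return True
--     return False
--
-- def row(value, y, i):
--     return all(True if i != value[y][_x] else False for _x in range(9))
--
-- def column(value, x, i):
--     return all(True if i != value[_y][x] else False for _y in range(9))
--
-- def block(value, x, y, i):
--     #所属するブロックの一番左上のマスの座標を求める
--     xbase = (x // 3) * 3
--     ybase = (y // 3) * 3
--
--     #求めた座標のx,y軸を+3した範囲でチェックするとブロック内でのチェックが出来る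
--     return all(True if i != value[_y][_x] else False
--             for _y in range(ybase, ybase + 3)
--                 for _x in range(xbase, xbase + 3))
-- ===== SOURCE B (Python) =====
-- def tech1_group(value, x, y, i):
--     xb = x - x % 3
--     yb = y - y % 3
--     # One pass over the block accumulating count and coordinate sums of empty
--     # cells: for a unique empty cell the sums ARE its coordinates, so no second
--     # scan is needed to locate it.
--     cnt = sx = sy = 0
--     for r in range(yb, yb + 3):
--         for c in range(xb, xb + 3):
--             if value[r][c] == 0:
--                 cnt += 1
--                 sx += c
--                 sy += r
--     if cnt != 1:
--         return False
--     # single membership test against the union of digits seen from (sx, sy)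
--     seen = set(value[sy][:9]) \
--         | {value[r][sx] for r in range(9)} \
--         | {value[r][c] for r in range(yb, yb + 3) for c in range(xb, xb + 3)}
--     if i in seen:
--         return False
--     value[sy][sx] = i
--     return True
-- ===== Notes on version B (the rewrite author's own statement) =====
-- stated objective: alternative
-- what changed: B locates the unique empty cell arithmetically in the counting pass itself (accumulating the count together with the coordinate sums of empty cells, so count==1 makes the sums the cell's coordinates) and then decides with one membership test against the set union of the digits in that cell's row slice, column and block - instead of A's count-only pass followed by a second block scan that runs a 27-cell row/column/block check at every block cell until one succeeds.
-- outside the precondition, e.g. on tech1_group([[1, 1, 0], [1, 1, 1], [1, 1, 1]], 0, 0, 1): A returns False, B raises IndexError; on tech1_group([[0, 2, 2], [2, 2, 2], [2, 2, 2]], 0, 0, 2): A returns False, B raises IndexError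
import Mathlib
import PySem

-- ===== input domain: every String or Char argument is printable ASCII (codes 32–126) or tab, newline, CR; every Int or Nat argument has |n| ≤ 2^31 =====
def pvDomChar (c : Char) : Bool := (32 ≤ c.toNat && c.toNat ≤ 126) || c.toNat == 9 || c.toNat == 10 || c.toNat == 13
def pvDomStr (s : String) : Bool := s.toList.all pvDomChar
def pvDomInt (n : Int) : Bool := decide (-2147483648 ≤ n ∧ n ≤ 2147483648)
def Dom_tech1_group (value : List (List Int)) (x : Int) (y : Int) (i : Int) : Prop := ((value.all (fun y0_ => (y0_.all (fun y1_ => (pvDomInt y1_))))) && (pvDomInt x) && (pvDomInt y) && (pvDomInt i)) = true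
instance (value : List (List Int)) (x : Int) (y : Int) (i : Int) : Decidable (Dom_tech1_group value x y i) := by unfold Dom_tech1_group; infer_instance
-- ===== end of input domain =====

-- B locates the unique empty block cell arithmetically (count + coordinate sums in one pass) and
-- decides with one set-union membership test, instead of A's count pass plus a second block scan
-- running a 27-cell check at every block cell (objective: alternative). Both Pythons mutate
-- value[cy][cx] in place identically on the True path; the theorems are about the return value.

-- ===== PORT A =====
-- value[r][c], totalized with defaults; inside Pre_ every index A touches is Python-valid.
def pvCellA (value : List (List Int)) (r c : Int) : Int :=
  PySem.List.pyGetD (PySem.List.pyGetD value r []) c 0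

def pvRowA (value : List (List Int)) (y i : Int) : Bool :=
  (PySem.List.pyRange 0 9 1).all (fun _x => !(i == pvCellA value y _x))

def pvColumnA (value : List (List Int)) (x i : Int) : Bool :=
  (PySem.List.pyRange 0 9 1).all (fun _y => !(i == pvCellA value _y x))

def pvBlockA (value : List (List Int)) (x y i : Int) : Bool :=
  let xbase := (PySem.Int.floordiv x 3) * 3
  let ybase := (PySem.Int.floordiv y 3) * 3
  (PySem.List.pyRange ybase (ybase + 3) 1).all (fun _y =>
    (PySem.List.pyRange xbase (xbase + 3) 1).all (fun _x => !(i == pvCellA value _y _x)))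

def pvCheckA (value : List (List Int)) (x y i : Int) : Bool :=
  pvRowA value y i && pvColumnA value x i && pvBlockA value x y i

def tech1_group (value : List (List Int)) (x : Int) (y : Int) (i : Int) : Bool :=
  let xbase := (PySem.Int.floordiv x 3) * 3
  let ybase := (PySem.Int.floordiv y 3) * 3
  let zero_count := (PySem.List.pyRange ybase (ybase + 3) 1).foldl (fun acc _y =>
      (PySem.List.pyRange xbase (xbase + 3) 1).foldl (fun acc _x =>
        if pvCellA value _y _x == 0 then acc + 1 else acc) acc) (0 : Int)
  if zero_count == 1 then
    -- the second double loop: return True at the first cell passing check that is empty, else fall through to False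
    (PySem.List.pyRange ybase (ybase + 3) 1).any (fun _y =>
      (PySem.List.pyRange xbase (xbase + 3) 1).any (fun _x =>
        pvCheckA value _x _y i && (pvCellA value _y _x == 0)))
  else
    false

-- ===== PORT B =====
def pvCellB (value : List (List Int)) (r c : Int) : Int :=
  PySem.List.pyGetD (PySem.List.pyGetD value r []) c 0

-- one block pass accumulating (cnt, sum of empty columns, sum of empty rows); then one set union
def tech1_group_alt (value : List (List Int)) (x : Int) (y : Int) (i : Int) : Bool :=
  let xb := x - PySem.Int.mod x 3
  let yb := y - PySem.Int.mod y 3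
  let t := (PySem.List.pyRange yb (yb + 3) 1).foldl (fun acc r =>
      (PySem.List.pyRange xb (xb + 3) 1).foldl (fun acc c =>
        if pvCellB value r c == 0 then (acc.1 + 1, acc.2.1 + c, acc.2.2 + r) else acc) acc)
    ((0 : Int), (0 : Int), (0 : Int))
  if t.1 != 1 then false
  else
    let seen := PySem.Set.union (PySem.Set.union
        (PySem.Set.ofList (PySem.List.slice (PySem.List.pyGetD value t.2.2 []) none (some 9)))
        ((PySem.List.pyRange 0 9 1).map (fun r => pvCellB value r t.2.1)))
        ((PySem.List.pyRange yb (yb + 3) 1).flatMap (fun r =>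
          (PySem.List.pyRange xb (xb + 3) 1).map (fun c => pvCellB value r c)))
    if PySem.Set.contains seen i then false
    else true

-- ===== PRECONDITION & SPEC =====
-- Pre_ admits exactly the inputs where no cell access of Python A (or B) is out of range: the 3x3
-- block must be readable (Python indexing, negative wraparound included) and -- only when the block
-- has exactly one empty cell, so that the check/placement phase runs -- the scanned rows and columns
-- must be fully readable too. It excludes value-dependent corners where A returns only because a
-- short-circuited conflict test stops before an out-of-range access while B's set building raises;
-- such excluded inputs are cited in the claim.
def Pre_tech1_group (value : List (List Int)) (x : Int) (y : Int) (i : Int) : Prop :=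
  (∀ r ∈ PySem.List.pyRange (PySem.Int.floordiv y 3 * 3) (PySem.Int.floordiv y 3 * 3 + 3) 1,
      PySem.Raise.InRange value.length r ∧
      ∀ c ∈ PySem.List.pyRange (PySem.Int.floordiv x 3 * 3) (PySem.Int.floordiv x 3 * 3 + 3) 1,
        PySem.Raise.InRange (PySem.List.pyGetD value r []).length c) ∧
  ((((PySem.List.pyRange (PySem.Int.floordiv y 3 * 3) (PySem.Int.floordiv y 3 * 3 + 3) 1).flatMap
      (fun r => (PySem.List.pyRange (PySem.Int.floordiv x 3 * 3) (PySem.Int.floordiv x 3 * 3 + 3) 1).map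
        (fun c => PySem.List.pyGetD (PySem.List.pyGetD value r []) c 0))).count 0 = 1) →
    (∀ r ∈ PySem.List.pyRange (PySem.Int.floordiv y 3 * 3) (PySem.Int.floordiv y 3 * 3 + 3) 1,
        9 ≤ (PySem.List.pyGetD value r []).length) ∧
    (∀ r ∈ PySem.List.pyRange 0 9 1,
        PySem.Raise.InRange value.length r ∧
        ∀ c ∈ PySem.List.pyRange (PySem.Int.floordiv x 3 * 3) (PySem.Int.floordiv x 3 * 3 + 3) 1,
          PySem.Raise.InRange (PySem.List.pyGetD value r []).length c))
instance (value : List (List Int)) (x : Int) (y : Int) (i : Int) : Decidable (Pre_tech1_group value x y i) := by unfold Pre_tech1_group; infer_instance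

def pvWitness_tech1_group : List (List Int) × Int × Int × Int :=
  ([[0,2,3,4,5,6,7,8,9],[4,5,6,7,8,9,1,2,3],[7,8,9,1,2,3,4,5,6],
    [2,3,4,5,6,7,8,9,1],[5,6,7,8,9,1,2,3,4],[8,9,1,2,3,4,5,6,7],
    [3,4,5,6,7,8,9,1,2],[6,7,8,9,1,2,3,4,5],[9,1,2,3,4,5,6,7,8]], 0, 0, 1)

def Spec_tech1_group (value : List (List Int)) (x : Int) (y : Int) (i : Int) (out : Bool) : Prop := out = tech1_group_alt value x y i
instance (value : List (List Int)) (x : Int) (y : Int) (i : Int) (out : Bool) : Decidable (Spec_tech1_group value x y i out) := by unfold Spec_tech1_group; infer_instance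

-- ===== CLAIM (what is proved, stated in full; the proofs are below) =====
def Claim_equal_tech1_group : Prop := ∀ (value : List (List Int)) (x : Int) (y : Int) (i : Int), Dom_tech1_group value x y i → Pre_tech1_group value x y i → Spec_tech1_group value x y i (tech1_group value x y i)

-- ===== LEMMAS AND PROOFS =====

theorem pvCellBA : pvCellB = pvCellA := rfl

-- grid/block coordinate pairs (r, c), row-major
def pvPairs (a b c d : Int) : List (Int × Int) :=
  (PySem.List.pyRange a b 1).flatMap (fun r => (PySem.List.pyRange c d 1).map (fun cc => (r, cc)))

theorem mem_pvPairs (a b c d : Int) (p : Int × Int) :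
    p ∈ pvPairs a b c d ↔ (a ≤ p.1 ∧ p.1 < b) ∧ (c ≤ p.2 ∧ p.2 < d) := by
  cases p with
  | mk r cc =>
    simp [pvPairs, List.mem_flatMap, PySem.List.mem_pyRange_one]

-- B's per-cell accumulator update, flattened over coordinate pairs
def pvStepS (value : List (List Int)) (s : Int × Int × Int) (p : Int × Int) : Int × Int × Int :=
  if pvCellB value p.1 p.2 == 0 then (s.1 + 1, s.2.1 + p.2, s.2.2 + p.1) else s

-- B's nested block loop is the flat fold of pvStepS over the row-major pair list
theorem fold_nested_eq2 (value : List (List Int)) (yb xb : Int) (s0 : Int × Int × Int) :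
    ((PySem.List.pyRange yb (yb + 3) 1).foldl (fun s r =>
      (PySem.List.pyRange xb (xb + 3) 1).foldl (fun s c =>
        if pvCellB value r c == 0 then (s.1 + 1, s.2.1 + c, s.2.2 + r) else s) s) s0)
    = (pvPairs yb (yb + 3) xb (xb + 3)).foldl (pvStepS value) s0 := by
  have h : (fun (s : Int × Int × Int) (r : Int) =>
      (PySem.List.pyRange xb (xb + 3) 1).foldl (fun s c =>
        if pvCellB value r c == 0 then (s.1 + 1, s.2.1 + c, s.2.2 + r) else s) s)
      = (fun s r => (PySem.List.pyRange xb (xb + 3) 1).foldl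
          (fun s c => pvStepS value s (r, c)) s) := by
    funext s r
    refine PySem.List.foldl_congr_mem _ _ _ _ ?_
    intro acc c _
    rfl
  rw [h, pvPairs, List.foldl_flatMap]
  simp only [List.foldl_map]

-- B's accumulating pass: count and the two coordinate sums of the zero cells
theorem sum_char (value : List (List Int)) (ps : List (Int × Int)) (a b c : Int) :
    ps.foldl (pvStepS value) (a, b, c)
    = (a + ((ps.filter (fun p => pvCellA value p.1 p.2 == 0)).length : Int),
       b + ((ps.filter (fun p => pvCellA value p.1 p.2 == 0)).map Prod.snd).sum,
       c + ((ps.filter (fun p => pvCellA value p.1 p.2 == 0)).map Prod.fst).sum) := by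
  induction ps generalizing a b c with
  | nil => simp
  | cons p t ih =>
    simp only [List.foldl_cons, List.filter_cons, pvStepS, pvCellBA]
    by_cases hv : pvCellA value p.1 p.2 == 0
    · rw [if_pos hv, ih]
      simp only [hv, if_pos, List.length_cons, List.map_cons, List.sum_cons]
      refine Prod.ext ?_ (Prod.ext ?_ ?_) <;> simp <;> push_cast <;> ring
    · rw [if_neg hv, ih]
      simp [hv]

-- the block's value list is the cell map over the block's pair list
theorem flat_cell (O I : List Int) (f : Int → Int → Int) :
    O.flatMap (fun r => I.map (fun c => f r c))
    = (O.flatMap (fun r => I.map (fun c => (r, c)))).map (fun p => f p.1 p.2) := by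
  induction O with
  | nil => simp
  | cons o t ih => simp [List.map_map, ih, Function.comp_def]

-- membership in the first 9 entries of a long-enough row, as A reads them
theorem pvMemTake9 (xs : List Int) (hlen : 9 ≤ xs.length) (i : Int) :
    i ∈ xs.take 9 ↔ ∃ c : Int, (0 ≤ c ∧ c < 9) ∧ PySem.List.pyGetD xs c 0 = i := by
  rw [List.mem_iff_getElem]
  constructor
  · rintro ⟨k, hk, hget⟩
    rw [List.length_take] at hk
    have hk9 : k < 9 := lt_of_lt_of_le hk (min_le_left _ _)
    have hkl : k < xs.length := by omega
    refine ⟨(k : Int), ⟨Int.natCast_nonneg k, by exact_mod_cast hk9⟩, ?_⟩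
    rw [PySem.List.pyGetD_natCast, List.getD_eq_getElem _ _ hkl, ← hget, List.getElem_take]
  · rintro ⟨c, ⟨hc0, hc9⟩, hcell⟩
    have hcn : c.toNat < 9 := by omega
    have hcl : c.toNat < xs.length := by omega
    refine ⟨c.toNat, by rw [List.length_take]; omega, ?_⟩
    have hcc : c = ((c.toNat : Nat) : Int) := by omega
    rw [hcc, PySem.List.pyGetD_natCast, List.getD_eq_getElem _ _ hcl] at hcell
    rw [List.getElem_take]
    exact hcell

theorem pvFdBand (k t : Int) (h1 : 3 * k ≤ t) (h2 : t < 3 * k + 3) :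
    PySem.Int.floordiv t 3 * 3 = 3 * k := by
  have h := PySem.Int.floordiv_mul_add_mod t 3
  have hm1 := PySem.Int.mod_nonneg t (by norm_num : (0:Int) < 3)
  have hm2 := PySem.Int.mod_lt t (by norm_num : (0:Int) < 3)
  omega

-- A's first-true scan 'any p, f p && g p' equals f at the unique g-element
theorem any_and_of_filter_singleton {α : Type} (L : List α) (f g : α → Bool) (c : α)
    (h : L.filter g = [c]) : L.any (fun p => f p && g p) = f c := by
  induction L with
  | nil => simp at h
  | cons a t ih =>
    by_cases hg : g a = true
    · simp [hg] at h
      obtain ⟨rfl, ht⟩ := h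
      have hf : t.any (fun p => f p && g p) = false := by
        simp only [List.any_eq_false]
        intro p hp
        simp [ht p hp]
      simp [List.any_cons, hg, hf]
    · simp [hg] at h
      simp [List.any_cons, hg, ih h]

-- A's nested counting loop counts the zero pairs of the block, row-major
theorem nested_count (O I : List Int) (z : Int → Int → Bool) (init : Int) :
    O.foldl (fun acc r => I.foldl (fun acc c => if z r c then acc + 1 else acc) acc) init
    = init + ((O.flatMap (fun r => I.map (fun c => (r, c)))).filter (fun p => z p.1 p.2)).length := by
  induction O generalizing init with
  | nil => simp
  | cons o t ih =>
    simp only [List.foldl_cons, List.flatMap_cons, List.filter_append, List.length_append]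
    rw [ih, PySem.List.foldl_count_if]
    simp only [List.filter_map, List.length_map, Function.comp_def, List.countP_eq_length_filter]
    push_cast
    ring

theorem nested_any (O I : List Int) (g : Int → Int → Bool) :
    (O.any fun r => I.any fun c => g r c)
    = (O.flatMap (fun r => I.map (fun c => (r, c)))).any (fun p => g p.1 p.2) := by
  simp [List.any_flatMap, List.any_map, Function.comp_def]

theorem nested_all_not (a b c d : Int) (g : Int → Int → Bool) :
    ((PySem.List.pyRange a b 1).all fun r => (PySem.List.pyRange c d 1).all fun cc => !(g r cc))
    = !((pvPairs a b c d).any (fun p => g p.1 p.2)) := by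
  rw [pvPairs, ← nested_any]
  generalize PySem.List.pyRange a b 1 = O
  generalize PySem.List.pyRange c d 1 = I
  induction O with
  | nil => simp
  | cons a t ih => simp [List.any_cons, ih, List.all_eq_not_any_not]

-- count of zeros in the block's value list = number of zero cells
theorem count_zero_map (ps : List (Int × Int)) (f : Int × Int → Int) :
    (ps.map f).count 0 = (ps.filter (fun p => f p == 0)).length := by
  induction ps with
  | nil => simp
  | cons p t ih =>
    by_cases h : f p = 0
    · simp [List.count_cons, List.filter_cons, h, ih]
    · simp [List.count_cons, List.filter_cons, h, ih]

-- ===== VERDICT (by name: the statement is the Claim_ definition above) =====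
theorem tech1_group_spec : Claim_equal_tech1_group := by
  intro value x y i _ hpre
  obtain ⟨hblock, hone⟩ := hpre
  unfold Spec_tech1_group
  have hxb : x - PySem.Int.mod x 3 = PySem.Int.floordiv x 3 * 3 := by
    have h := PySem.Int.floordiv_mul_add_mod x 3
    omega
  have hyb : y - PySem.Int.mod y 3 = PySem.Int.floordiv y 3 * 3 := by
    have h := PySem.Int.floordiv_mul_add_mod y 3
    omega
  set xb := PySem.Int.floordiv x 3 * 3 with hxbdef
  set yb := PySem.Int.floordiv y 3 * 3 with hybdef
  -- A reduced to the block pair list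
  have hA : tech1_group value x y i
      = (if ((0:Int) + ((pvPairs yb (yb+3) xb (xb+3)).filter
              (fun p => pvCellA value p.1 p.2 == 0)).length == 1) then
          (pvPairs yb (yb+3) xb (xb+3)).any
            (fun p => pvCheckA value p.2 p.1 i && (pvCellA value p.1 p.2 == 0))
        else false) := by
    simp only [tech1_group]
    rw [nested_count _ _ (fun r c => pvCellA value r c == 0),
        nested_any _ _ (fun r c => pvCheckA value c r i && (pvCellA value r c == 0))]
    rfl
  -- B reduced: the pass yields (count, sum of empty cols, sum of empty rows)
  have hB : tech1_group_alt value x y i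
      = (if (((0:Int) + ((pvPairs yb (yb+3) xb (xb+3)).filter
              (fun p => pvCellA value p.1 p.2 == 0)).length) != 1) then false
         else
          if PySem.Set.contains (PySem.Set.union (PySem.Set.union
              (PySem.Set.ofList (PySem.List.slice (PySem.List.pyGetD value
                ((0:Int) + (((pvPairs yb (yb+3) xb (xb+3)).filter
                  (fun p => pvCellA value p.1 p.2 == 0)).map Prod.fst).sum) []) none (some 9)))
              ((PySem.List.pyRange 0 9 1).map (fun r => pvCellA value r
                ((0:Int) + (((pvPairs yb (yb+3) xb (xb+3)).filter
                  (fun p => pvCellA value p.1 p.2 == 0)).map Prod.snd).sum))))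
              ((PySem.List.pyRange yb (yb + 3) 1).flatMap (fun r =>
                (PySem.List.pyRange xb (xb + 3) 1).map (fun c => pvCellA value r c)))) i
          then false else true) := by
    simp only [tech1_group_alt, hxb, hyb]
    rw [fold_nested_eq2, sum_char]
    simp only [pvCellBA]
    rfl
  rw [hA, hB]
  -- the Pre_ single-empty hypothesis in terms of the zero-cell list
  have honeF : ((pvPairs yb (yb+3) xb (xb+3)).filter
        (fun p => pvCellA value p.1 p.2 == 0)).length = 1 →
      (∀ r ∈ PySem.List.pyRange yb (yb+3) 1, 9 ≤ (PySem.List.pyGetD value r []).length) := by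
    intro hlen
    have hc : (((PySem.List.pyRange yb (yb+3) 1).flatMap
        (fun r => (PySem.List.pyRange xb (xb+3) 1).map
          (fun c => PySem.List.pyGetD (PySem.List.pyGetD value r []) c 0))).count 0 = 1) := by
      have hfc := flat_cell (PySem.List.pyRange yb (yb+3) 1) (PySem.List.pyRange xb (xb+3) 1)
        (fun r c => PySem.List.pyGetD (PySem.List.pyGetD value r []) c 0)
      rw [hfc, count_zero_map]
      exact hlen
    exact (hone hc).1
  rcases hF : (pvPairs yb (yb+3) xb (xb+3)).filter (fun p => pvCellA value p.1 p.2 == 0)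
    with - | ⟨z, zt⟩
  · rw [hF]
    simp
  rcases zt with - | ⟨z2, t2⟩
  · -- exactly one empty cell z: A runs its check scan, B tests the union set
    rw [hF]
    have hzmem : z ∈ (pvPairs yb (yb+3) xb (xb+3)).filter (fun p => pvCellA value p.1 p.2 == 0) := by
      rw [hF]; exact List.mem_cons_self
    obtain ⟨hzb, hz0⟩ := List.mem_filter.mp hzmem
    obtain ⟨⟨hz1a, hz1b⟩, hz2a, hz2b⟩ := (mem_pvPairs _ _ _ _ _).mp hzb
    have hrow9 : 9 ≤ (PySem.List.pyGetD value z.1 []).length := by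
      refine honeF (by rw [hF]; rfl) z.1 ?_
      exact PySem.List.mem_pyRange_one.mpr ⟨hz1a, hz1b⟩
    rw [if_pos (by norm_num)]
    rw [if_neg (by norm_num)]
    rw [any_and_of_filter_singleton _ (fun p => pvCheckA value p.2 p.1 i)
          (fun p => pvCellA value p.1 p.2 == 0) z hF]
    simp only [List.map_cons, List.map_nil, List.sum_cons, List.sum_nil, add_zero, zero_add]
    -- base coordinates of z's own block are the same xb, yb
    have hfdz2 : PySem.Int.floordiv z.2 3 * 3 = xb := by
      have h := pvFdBand (PySem.Int.floordiv x 3) z.2 (by omega) (by omega)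
      omega
    have hfdz1 : PySem.Int.floordiv z.1 3 * 3 = yb := by
      have h := pvFdBand (PySem.Int.floordiv y 3) z.1 (by omega) (by omega)
      omega
    have hslice : PySem.List.slice (PySem.List.pyGetD value z.1 []) none (some 9)
        = (PySem.List.pyGetD value z.1 []).take 9 := by
      rw [PySem.List.slice_to _ (by norm_num)]
      rfl
    rw [hslice]
    -- membership in B's union set, spelled out
    have hseen : PySem.Set.contains (PySem.Set.union (PySem.Set.union
          (PySem.Set.ofList ((PySem.List.pyGetD value z.1 []).take 9))
          ((PySem.List.pyRange 0 9 1).map (fun r => pvCellA value r z.2)))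
          ((PySem.List.pyRange yb (yb + 3) 1).flatMap (fun r =>
            (PySem.List.pyRange xb (xb + 3) 1).map (fun c => pvCellA value r c)))) i = true
        ↔ ((∃ c : Int, (0 ≤ c ∧ c < 9) ∧ pvCellA value z.1 c = i)
           ∨ (∃ r : Int, (0 ≤ r ∧ r < 9) ∧ pvCellA value r z.2 = i)
           ∨ (∃ p ∈ pvPairs yb (yb+3) xb (xb+3), pvCellA value p.1 p.2 = i)) := by
      rw [PySem.Set.contains_iff _ _, PySem.Set.mem_union, PySem.Set.mem_union,
          PySem.Set.mem_ofList, flat_cell]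
      constructor
      · rintro ((h | h) | h)
        · exact Or.inl ((pvMemTake9 _ hrow9 i).mp h)
        · obtain ⟨r, hr, hcell⟩ := List.mem_map.mp h
          exact Or.inr (Or.inl ⟨r, PySem.List.mem_pyRange_one.mp hr, hcell⟩)
        · obtain ⟨p, hp, hcell⟩ := List.mem_map.mp h
          exact Or.inr (Or.inr ⟨p, hp, hcell⟩)
      · rintro (h | ⟨r, hr, hcell⟩ | ⟨p, hp, hcell⟩)
        · exact Or.inl (Or.inl ((pvMemTake9 _ hrow9 i).mpr h))
        · exact Or.inl (Or.inr (List.mem_map.mpr ⟨r, PySem.List.mem_pyRange_one.mpr hr, hcell⟩))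
        · exact Or.inr (List.mem_map.mpr ⟨p, hp, hcell⟩)
    cases hs : PySem.Set.contains (PySem.Set.union (PySem.Set.union
          (PySem.Set.ofList ((PySem.List.pyGetD value z.1 []).take 9))
          ((PySem.List.pyRange 0 9 1).map (fun r => pvCellA value r z.2)))
          ((PySem.List.pyRange yb (yb + 3) 1).flatMap (fun r =>
            (PySem.List.pyRange xb (xb + 3) 1).map (fun c => pvCellA value r c)))) i
    · -- i nowhere in sight: all three of A's checks pass
      have hnot := hs ▸ hseen
      have hno : ¬ ((∃ c : Int, (0 ≤ c ∧ c < 9) ∧ pvCellA value z.1 c = i)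
           ∨ (∃ r : Int, (0 ≤ r ∧ r < 9) ∧ pvCellA value r z.2 = i)
           ∨ (∃ p ∈ pvPairs yb (yb+3) xb (xb+3), pvCellA value p.1 p.2 = i)) := by
        intro hc
        exact absurd (hnot.mpr hc) (by simp)
      push_neg at hno
      obtain ⟨hno1, hno2, hno3⟩ := hno
      have hr : pvRowA value z.1 i = true := by
        rw [pvRowA, List.all_eq_true]
        intro c hc
        rw [PySem.List.mem_pyRange_one] at hc
        have := hno1 c hc
        simp only [Bool.not_eq_eq_eq_not, Bool.not_true]
        cases hbe : (i == pvCellA value z.1 c)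
        · rfl
        · exact absurd (beq_iff_eq.mp hbe).symm this
      have hcc : pvColumnA value z.2 i = true := by
        rw [pvColumnA, List.all_eq_true]
        intro r hrm
        rw [PySem.List.mem_pyRange_one] at hrm
        have := hno2 r hrm
        cases hbe : (i == pvCellA value r z.2)
        · rfl
        · exact absurd (beq_iff_eq.mp hbe).symm this
      have hbk : pvBlockA value z.2 z.1 i = true := by
        simp only [pvBlockA, hfdz2, hfdz1]
        rw [nested_all_not]
        have : ((pvPairs yb (yb+3) xb (xb+3)).any
            (fun p => i == pvCellA value p.1 p.2)) = false := by
          rw [List.any_eq_false]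
          intro p hp
          have := hno3 p hp
          cases hbe : (i == pvCellA value p.1 p.2)
          · simp
          · exact absurd (beq_iff_eq.mp hbe).symm this
        exact this ▸ rfl
      simp [pvCheckA, hr, hcc, hbk]
    · -- i is seen: the corresponding check of A fails
      have hyes := (hs ▸ hseen).mp rfl
      rcases hyes with ⟨c, hc, hcell⟩ | ⟨r, hrm, hcell⟩ | ⟨p, hp, hcell⟩
      · have hr : pvRowA value z.1 i = false := by
          rw [pvRowA, List.all_eq_false]
          exact ⟨c, PySem.List.mem_pyRange_one.mpr hc, by simp [hcell]⟩
        simp [pvCheckA, hr]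
      · have hcc : pvColumnA value z.2 i = false := by
          rw [pvColumnA, List.all_eq_false]
          exact ⟨r, PySem.List.mem_pyRange_one.mpr hrm, by simp [hcell]⟩
        simp [pvCheckA, hcc]
      · have hbk : pvBlockA value z.2 z.1 i = false := by
          simp only [pvBlockA, hfdz2, hfdz1]
          rw [nested_all_not]
          have : ((pvPairs yb (yb+3) xb (xb+3)).any
              (fun p => i == pvCellA value p.1 p.2)) = true := by
            rw [List.any_eq_true]
            exact ⟨p, hp, by simp [hcell]⟩
          rw [this]
          rfl
        simp [pvCheckA, hbk]
  · -- two or more empties: both sides are False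
    rw [hF]
    have h1 : ((0:Int) + (((z :: z2 :: t2).length : Nat) : Int) == 1) = false := by
      simp only [List.length_cons]
      push_cast
      simp
      omega
    have h2 : ((0:Int) + (((z :: z2 :: t2).length : Nat) : Int) != 1) = true := by
      simp only [bne, h1]
      rfl
    rw [h1, h2]
    rfl
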